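-- pv_equiv track=rewrite | github.com/aditya-kd/toolbox | work_aditya/udit.py | findSubarrCnt
-- ===== SOURCE A (Python) =====
-- def findSubarrCnt(arr, n) :
--  ans = 0
--  XOR = 0
--  prefix = [0] * n
--  for i in range(n) :
--
--   XOR = XOR ^ arr[i]
--   prefix[i] = XOR
--
--  oddGroup = dict.fromkeys(prefix, 0)
--  evenGroup = dict.fromkeys(prefix, 0)
--  oddGroup[0] = 1
--
--  for i in range(n) :
--
--   if (i & 1) :
--    ans += oddGroup[prefix[i]]
--    oddGroup[prefix[i]] += 1
--   else :
--    ans += evenGroup[prefix[i]]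
--    evenGroup[prefix[i]] += 1
--
--
--  return ans
-- ===== SOURCE B (Python) =====
-- def findSubarrCnt(arr, n):
--     # prefix XORs (indexing arr[i] over range(n), as the task does)
--     XOR = 0
--     prefixes = []
--     for i in range(n):
--         XOR = XOR ^ arr[i]
--         prefixes.append(XOR)
--     # group: prefix value -> (count at even indices, count at odd indices);
--     # the virtual prefix 0 at index -1 counts as odd.
--     groups = {0: (0, 1)}
--     for i, p in enumerate(prefixes):
--         e, o = groups.get(p, (0, 0))
--         if i & 1:
--             groups[p] = (e, o + 1)
--         else:
--             groups[p] = (e + 1, o)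
--     # each group contributes C(e,2) + C(o,2) pairs
--     return sum(e * (e - 1) // 2 + o * (o - 1) // 2 for e, o in groups.values())
-- ===== Notes on version B (the rewrite author's own statement) =====
-- stated objective: alternative
-- what changed: Replaces the incremental see-then-increment accumulation over two parity dicts by grouping prefix-XOR values with (even,odd) occurrence counts and summing the closed form C(even,2)+C(odd,2) per group in a second pass.
import Mathlib
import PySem

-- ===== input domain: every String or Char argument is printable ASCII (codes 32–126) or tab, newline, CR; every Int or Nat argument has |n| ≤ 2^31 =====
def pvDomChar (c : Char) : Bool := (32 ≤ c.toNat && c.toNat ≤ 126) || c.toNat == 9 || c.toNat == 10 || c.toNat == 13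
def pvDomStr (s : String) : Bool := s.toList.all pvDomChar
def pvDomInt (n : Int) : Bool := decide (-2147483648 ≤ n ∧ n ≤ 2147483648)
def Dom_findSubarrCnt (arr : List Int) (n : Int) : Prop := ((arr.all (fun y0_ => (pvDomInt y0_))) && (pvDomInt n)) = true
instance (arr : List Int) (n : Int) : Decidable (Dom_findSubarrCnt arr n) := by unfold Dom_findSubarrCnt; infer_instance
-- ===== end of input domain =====

-- B groups pfx-XOR values with (even,odd) index counts and sums C(e,2)+C(o,2) per group,
-- instead of A's incremental see-then-increment accumulation over two parity dicts (objective: alternative).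

-- ===== PORT A =====
def findSubarrCnt (arr : List Int) (n : Int) : Int :=
  -- pfx = [0]*n filled in order by the first loop; arr[i] is exact under Pre_ (i < n ≤ len arr)
  let pfx := ((PySem.List.pyRange 0 n 1).foldl
      (fun (st : Int × List Int) i =>
        let X := PySem.Int.bxor st.1 (PySem.List.pyGetD arr i 0)
        (X, st.2 ++ [X])) (0, [])).2
  -- dict.fromkeys(pfx, 0)
  let oddGroup0 : PySem.Dict Int Int :=
    (PySem.List.dedup pfx).foldl (fun d k => d.insert k 0) PySem.Dict.empty
  let evenGroup0 : PySem.Dict Int Int :=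
    (PySem.List.dedup pfx).foldl (fun d k => d.insert k 0) PySem.Dict.empty
  let oddGroup := oddGroup0.insert 0 1
  -- second loop; oddGroup[pfx[i]] / evenGroup[pfx[i]]: the key is always present
  -- (every pfx[i] is a key of dict.fromkeys(pfx, 0)), so getD _ 0 is exact
  let st := (PySem.List.pyRange 0 n 1).foldl
      (fun (st : Int × PySem.Dict Int Int × PySem.Dict Int Int) i =>
        let p := PySem.List.pyGetD pfx i 0
        if PySem.Int.band i 1 ≠ 0 then
          let v := st.2.1.getD p 0
          (st.1 + v, st.2.1.insert p (v + 1), st.2.2)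
        else
          let v := st.2.2.getD p 0
          (st.1 + v, st.2.1, st.2.2.insert p (v + 1)))
      (0, oddGroup, evenGroup0)
  st.1

-- ===== PORT B =====
def findSubarrCnt_alt (arr : List Int) (n : Int) : Int :=
  let prefixes := ((PySem.List.pyRange 0 n 1).foldl
      (fun (st : Int × List Int) i =>
        let X := PySem.Int.bxor st.1 (PySem.List.pyGetD arr i 0)
        (X, st.2 ++ [X])) (0, [])).2
  -- groups = {0: (0, 1)}; groups.get(p, (0, 0)) then overwrite
  let groups := (PySem.List.enumerate prefixes 0).foldl
      (fun (g : PySem.Dict Int (Int × Int)) ip =>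
        let eo := g.getD ip.2 (0, 0)
        if PySem.Int.band ip.1 1 ≠ 0 then g.insert ip.2 (eo.1, eo.2 + 1)
        else g.insert ip.2 (eo.1 + 1, eo.2))
      (PySem.Dict.empty.insert 0 ((0 : Int), (1 : Int)))
  -- sum(e*(e-1)//2 + o*(o-1)//2 for e, o in groups.values())
  groups.values.foldl (fun s eo =>
      s + (PySem.Int.floordiv (eo.1 * (eo.1 - 1)) 2 + PySem.Int.floordiv (eo.2 * (eo.2 - 1)) 2)) 0

-- ===== PRECONDITION & SPEC =====
def Pre_findSubarrCnt (arr : List Int) (n : Int) : Prop := n ≤ (arr.length : Int)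
instance (arr : List Int) (n : Int) : Decidable (Pre_findSubarrCnt arr n) := by unfold Pre_findSubarrCnt; infer_instance
def pvWitness_findSubarrCnt : List Int × Int := ([1, 2, 3, 2], 4)
def Spec_findSubarrCnt (arr : List Int) (n : Int) (out : Int) : Prop := out = findSubarrCnt_alt arr n
instance (arr : List Int) (n : Int) (out : Int) : Decidable (Spec_findSubarrCnt arr n out) := by unfold Spec_findSubarrCnt; infer_instance

-- ===== CLAIM =====
def Claim_equal_findSubarrCnt : Prop := ∀ (arr : List Int) (n : Int), Dom_findSubarrCnt arr n → Pre_findSubarrCnt arr n → Spec_findSubarrCnt arr n (findSubarrCnt arr n)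


-- ===== LEMMAS AND PROOFS =====

-- C(m,2) and its facts
def pvC2 (m : Nat) : Int := (Nat.choose m 2 : Int)

lemma pvC2_zero : pvC2 0 = 0 := by decide

lemma pvC2_one : pvC2 1 = 0 := by decide

lemma pvC2_succ (m : Nat) : pvC2 (m + 1) = pvC2 m + m := by
  unfold pvC2
  rw [Nat.choose_succ_succ, Nat.choose_one_right]
  push_cast
  ring

lemma pvFloordiv_C2 (m : Nat) :
    PySem.Int.floordiv ((m : Int) * ((m : Int) - 1)) 2 = pvC2 m := by
  cases m with
  | zero => decide
  | succ k =>
      have h1 : ((k + 1 : Nat) : Int) * (((k + 1 : Nat) : Int) - 1) = (((k + 1) * k : Nat) : Int) := by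
        push_cast; ring
      rw [h1]
      have h2 : PySem.Int.floordiv (((k + 1) * k : Nat) : Int) (((2 : Nat) : Int))
          = (((k + 1) * k / 2 : Nat) : Int) := PySem.Int.floordiv_natCast _ _
      have h2' : PySem.Int.floordiv (((k + 1) * k : Nat) : Int) 2
          = (((k + 1) * k / 2 : Nat) : Int) := by exact_mod_cast h2
      rw [h2']
      unfold pvC2
      rw [Nat.choose_two_right]
      norm_cast

-- the incremental "see then increment" accumulation, abstracted to a pure count function
def pvIncPairs : List (Int × Bool) → ((Int × Bool) → Int) → Int
  | [], _ => 0
  | k :: ks, c => c k + pvIncPairs ks (fun k' => if k' = k then c k' + 1 else c k')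

lemma pvIncPairs_concat (l : List (Int × Bool)) (x : Int × Bool) (c : (Int × Bool) → Int) :
    pvIncPairs (l ++ [x]) c = pvIncPairs l c + c x + (l.count x : Int) := by
  induction l generalizing c with
  | nil => simp [pvIncPairs]
  | cons k l ih =>
      simp only [List.cons_append, pvIncPairs, ih, List.count_cons]
      by_cases hxk : x = k
      · subst hxk; simp
        push_cast
        ring
      · simp [hxk, Ne.symm hxk, beq_iff_eq]
        ring

-- sum of C(count,2) over the distinct keys
def pvS (t : List (Int × Bool)) : Int := ∑ k ∈ t.toFinset, pvC2 (t.count k)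

lemma pvS_concat (t : List (Int × Bool)) (x : Int × Bool) :
    pvS (t ++ [x]) = pvS t + (t.count x : Int) := by
  by_cases hx : x ∈ t
  · have hfin : (t ++ [x]).toFinset = t.toFinset := by
      ext k
      simp only [List.mem_toFinset, List.mem_append, List.mem_singleton]
      constructor
      · rintro (h | rfl)
        · exact h
        · exact hx
      · exact Or.inl
    have hxF : x ∈ t.toFinset := List.mem_toFinset.2 hx
    unfold pvS
    rw [hfin]
    rw [← Finset.sum_erase_add _ _ hxF, ← Finset.sum_erase_add _ (fun k => pvC2 (t.count k)) hxF]
    have hsame : ∀ k ∈ t.toFinset.erase x, pvC2 ((t ++ [x]).count k) = pvC2 (t.count k) := by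
      intro k hk
      have hne : k ≠ x := (Finset.mem_erase.1 hk).1
      have hne' : ¬ (x = k) := fun h => hne h.symm
      simp [List.count_append, List.count_singleton, hne']
    rw [Finset.sum_congr rfl hsame]
    have hcx : (t ++ [x]).count x = t.count x + 1 := by
      simp [List.count_append]
    rw [hcx, pvC2_succ]
    ring
  · have hfin : (t ++ [x]).toFinset = insert x t.toFinset := by
      ext k
      simp only [List.mem_toFinset, List.mem_append, List.mem_singleton, Finset.mem_insert]
      tauto
    have hxF : x ∉ t.toFinset := fun h => hx (List.mem_toFinset.1 h)
    unfold pvS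
    rw [hfin, Finset.sum_insert hxF]
    have hcx : (t ++ [x]).count x = 1 := by
      simp [List.count_append, List.count_eq_zero.2 hx]
    have hcnt0 : t.count x = 0 := List.count_eq_zero.2 hx
    rw [hcx]
    have hsame : ∀ k ∈ t.toFinset, pvC2 ((t ++ [x]).count k) = pvC2 (t.count k) := by
      intro k hk
      have hne : k ≠ x := by
        intro h; subst h; exact hx (List.mem_toFinset.1 hk)
      have hne' : ¬ (x = k) := fun h => hne h.symm
      simp [List.count_append, List.count_singleton, hne']
    rw [Finset.sum_congr rfl hsame, pvC2_one, hcnt0]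
    simp

lemma pvIncPairs_eq_S (s : List (Int × Bool)) (l : List (Int × Bool)) :
    pvIncPairs l (fun k => (s.count k : Int)) = pvS (s ++ l) - pvS s := by
  induction l using List.reverseRecOn with
  | nil => simp [pvIncPairs]
  | append_singleton l x ih =>
      rw [← List.append_assoc, pvIncPairs_concat, pvS_concat, ih, List.count_append]
      push_cast
      ring

-- shared first loop: the prefix-XOR list
def pvPfx (arr : List Int) (n : Int) : List Int :=
  ((PySem.List.pyRange 0 n 1).foldl
      (fun (st : Int × List Int) i =>
        let X := PySem.Int.bxor st.1 (PySem.List.pyGetD arr i 0)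
        (X, st.2 ++ [X])) (0, [])).2

lemma pvPfx_len_aux (arr : List Int) (l : List Int) (a : Int) (acc : List Int) :
    ((l.foldl (fun (st : Int × List Int) i =>
        let X := PySem.Int.bxor st.1 (PySem.List.pyGetD arr i 0)
        (X, st.2 ++ [X])) (a, acc)).2).length = acc.length + l.length := by
  induction l generalizing a acc with
  | nil => simp
  | cons i l ih => simp [List.foldl_cons, ih]; omega

lemma pvPfx_len (arr : List Int) (n : Int) :
    (pvPfx arr n).length = (PySem.List.pyRange 0 n 1).length := by
  unfold pvPfx
  rw [pvPfx_len_aux]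
  simp

lemma pvRange_norm (n : Int) :
    PySem.List.pyRange 0 n 1 = PySem.List.pyRange 0 ((PySem.List.pyRange 0 n 1).length : Int) 1 := by
  rw [PySem.List.length_pyRange_one, PySem.List.pyRange_one, PySem.List.pyRange_one]
  have h : ((((n - 0).toNat : Int)) - 0).toNat = (n - 0).toNat := by omega
  rw [h]

-- the key of index/prefix pair: (prefix value, parity of the index)
def pvKey (ip : Int × Int) : Int × Bool := (ip.2, decide (PySem.Int.band ip.1 1 ≠ 0))

-- A's second-loop body over (index, prefix) pairs
def pvBodyA (st : Int × PySem.Dict Int Int × PySem.Dict Int Int) (ip : Int × Int) :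
    Int × PySem.Dict Int Int × PySem.Dict Int Int :=
  if PySem.Int.band ip.1 1 ≠ 0 then
    let v := st.2.1.getD ip.2 0
    (st.1 + v, st.2.1.insert ip.2 (v + 1), st.2.2)
  else
    let v := st.2.2.getD ip.2 0
    (st.1 + v, st.2.1, st.2.2.insert ip.2 (v + 1))

def pvOdd0 (arr : List Int) (n : Int) : PySem.Dict Int Int :=
  ((PySem.List.dedup (pvPfx arr n)).foldl (fun d k => d.insert k 0) PySem.Dict.empty).insert 0 1

def pvEven0 (arr : List Int) (n : Int) : PySem.Dict Int Int :=
  (PySem.List.dedup (pvPfx arr n)).foldl (fun d k => d.insert k 0) PySem.Dict.empty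

lemma pvA_eq (arr : List Int) (n : Int) :
    findSubarrCnt arr n =
      ((PySem.List.pyRange 0 n 1).foldl
        (fun st i => pvBodyA st (i, PySem.List.pyGetD (pvPfx arr n) i 0))
        (0, pvOdd0 arr n, pvEven0 arr n)).1 := rfl

lemma pvLoopA (l : List (Int × Int)) (ans : Int) (od ed : PySem.Dict Int Int)
    (c : (Int × Bool) → Int)
    (hod : ∀ ip ∈ l, od.getD ip.2 0 = c (ip.2, true))
    (hed : ∀ ip ∈ l, ed.getD ip.2 0 = c (ip.2, false)) :
    (l.foldl pvBodyA (ans, od, ed)).1 = ans + pvIncPairs (l.map pvKey) c := by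
  induction l generalizing ans od ed c with
  | nil => simp [pvIncPairs]
  | cons ip l ih =>
      by_cases hb : PySem.Int.band ip.1 1 ≠ 0
      · have hk : pvKey ip = (ip.2, true) := by simp [pvKey, hb]
        have hv : od.getD ip.2 0 = c (ip.2, true) := hod ip (List.mem_cons_self ..)
        simp only [List.foldl_cons, List.map_cons, pvIncPairs, hk, pvBodyA, if_pos hb]
        rw [ih _ _ _ (fun k' => if k' = (ip.2, true) then c k' + 1 else c k')]
        · rw [hv]; ring
        · intro ip' hip'
          rw [PySem.Dict.getD_insert]
          by_cases hp : ip'.2 = ip.2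
          · simp [hp, hv]
          · simp [hp, hod ip' (List.mem_cons_of_mem _ hip')]
        · intro ip' hip'
          simp [hed ip' (List.mem_cons_of_mem _ hip')]
      · have hk : pvKey ip = (ip.2, false) := by simp [pvKey, hb]
        have hv : ed.getD ip.2 0 = c (ip.2, false) := hed ip (List.mem_cons_self ..)
        simp only [List.foldl_cons, List.map_cons, pvIncPairs, hk, pvBodyA, if_neg hb]
        rw [ih _ _ _ (fun k' => if k' = (ip.2, false) then c k' + 1 else c k')]
        · rw [hv]; ring
        · intro ip' hip'
          simp [hod ip' (List.mem_cons_of_mem _ hip')]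
        · intro ip' hip'
          rw [PySem.Dict.getD_insert]
          by_cases hp : ip'.2 = ip.2
          · simp [hp, hv]
          · simp [hp, hed ip' (List.mem_cons_of_mem _ hip')]

lemma pvFromkeysZero (ks : List Int) (d : PySem.Dict Int Int)
    (h : ∀ p, d.getD p 0 = 0) (p : Int) :
    (ks.foldl (fun d k => d.insert k (0 : Int)) d).getD p 0 = 0 := by
  induction ks generalizing d with
  | nil => exact h p
  | cons k ks ih =>
      simp only [List.foldl_cons]
      apply ih
      intro q
      rw [PySem.Dict.getD_insert]
      split <;> simp [h]

lemma pvOdd0_getD (arr : List Int) (n : Int) (p : Int) :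
    (pvOdd0 arr n).getD p 0 = if p = 0 then 1 else 0 := by
  unfold pvOdd0
  rw [PySem.Dict.getD_insert]
  split <;> simp_all [pvFromkeysZero _ PySem.Dict.empty (by intro q; simp)]

lemma pvEven0_getD (arr : List Int) (n : Int) (p : Int) :
    (pvEven0 arr n).getD p 0 = 0 :=
  pvFromkeysZero _ PySem.Dict.empty (by intro q; simp) p

-- B's loop body over (index, prefix) pairs, written as a single insert
def pvBodyB (g : PySem.Dict Int (Int × Int)) (ip : Int × Int) : PySem.Dict Int (Int × Int) :=
  let eo := g.getD ip.2 (0, 0)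
  if PySem.Int.band ip.1 1 ≠ 0 then g.insert ip.2 (eo.1, eo.2 + 1)
  else g.insert ip.2 (eo.1 + 1, eo.2)

def pvG0 : PySem.Dict Int (Int × Int) := PySem.Dict.empty.insert 0 ((0 : Int), (1 : Int))

lemma pvB_eq (arr : List Int) (n : Int) :
    findSubarrCnt_alt arr n =
      (((PySem.List.enumerate (pvPfx arr n) 0).foldl pvBodyB pvG0).values.foldl
        (fun s eo =>
          s + (PySem.Int.floordiv (eo.1 * (eo.1 - 1)) 2 + PySem.Int.floordiv (eo.2 * (eo.2 - 1)) 2)) 0) := rfl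

lemma pvLoopB_getD (l : List (Int × Int)) (g : PySem.Dict Int (Int × Int)) (p : Int) :
    (l.foldl pvBodyB g).getD p (0, 0) =
      ((g.getD p (0, 0)).1 + ((l.map pvKey).count (p, false) : Int),
       (g.getD p (0, 0)).2 + ((l.map pvKey).count (p, true) : Int)) := by
  induction l generalizing g with
  | nil => simp
  | cons ip l ih =>
      by_cases hb : PySem.Int.band ip.1 1 ≠ 0
      · have hk : pvKey ip = (ip.2, true) := by simp [pvKey, hb]
        simp only [List.foldl_cons, List.map_cons, hk, pvBodyB, if_pos hb]
        rw [ih]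
        rw [PySem.Dict.getD_insert]
        by_cases hp : p = ip.2
        · subst hp
          simp [Prod.ext_iff]
          ring
        · simp [hp, List.count_cons, Prod.ext_iff, Ne.symm hp]
      · have hk : pvKey ip = (ip.2, false) := by simp [pvKey, hb]
        simp only [List.foldl_cons, List.map_cons, hk, pvBodyB, if_neg hb]
        rw [ih]
        rw [PySem.Dict.getD_insert]
        by_cases hp : p = ip.2
        · subst hp
          simp [Prod.ext_iff]
          ring
        · simp [hp, List.count_cons, Prod.ext_iff, Ne.symm hp]

lemma pvG0_getD (p : Int) : pvG0.getD p (0, 0) = if p = 0 then ((0 : Int), (1 : Int)) else (0, 0) := by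
  unfold pvG0
  rw [PySem.Dict.getD_insert]
  split <;> simp

lemma pvBodyB_insert : pvBodyB = fun g ip => g.insert ip.2 (
    let eo := g.getD ip.2 (0, 0)
    if PySem.Int.band ip.1 1 ≠ 0 then (eo.1, eo.2 + 1) else (eo.1 + 1, eo.2)) := by
  funext g ip
  unfold pvBodyB
  split <;> rfl

lemma pvLoopB_keys (l : List (Int × Int)) :
    (l.foldl pvBodyB pvG0).keys = PySem.Set.update pvG0.keys (l.map (·.2)) := by
  rw [pvBodyB_insert]
  exact PySem.Dict.keys_foldl_insert_key l (·.2) _ pvG0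

lemma pvLoopB_nodup (l : List (Int × Int)) : (l.foldl pvBodyB pvG0).keys.Nodup := by
  rw [pvBodyB_insert]
  exact PySem.Dict.nodup_keys_foldl_insert_key l (·.2) _ pvG0 (by decide)

-- fold of additions is init + sum
lemma pvFoldlAdd (l : List (Int × Int)) (f : (Int × Int) → Int) (init : Int) :
    l.foldl (fun s eo => s + f eo) init = init + (l.map f).sum := by
  induction l generalizing init with
  | nil => simp
  | cons x l ih => simp [ih]; ring

-- regrouping: summing C2 over distinct (value, parity) keys equals summing both parities over distinct values
lemma pvRegroup (L : List (Int × Bool)) (K : List Int)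
    (hnd : K.Nodup) (hcov : ∀ k ∈ L, k.1 ∈ K) :
    (K.map (fun p => pvC2 (L.count (p, false)) + pvC2 (L.count (p, true)))).sum
      = ∑ k ∈ L.toFinset, pvC2 (L.count k) := by
  have h1 : (K.map (fun p => pvC2 (L.count (p, false)) + pvC2 (L.count (p, true)))).sum
      = ∑ p ∈ K.toFinset, (pvC2 (L.count (p, false)) + pvC2 (L.count (p, true))) := by
    rw [← List.sum_toFinset _ hnd]
  rw [h1]
  have h2 : ∀ p, (pvC2 (L.count (p, false)) + pvC2 (L.count (p, true)))
      = ∑ b ∈ (Finset.univ : Finset Bool), pvC2 (L.count (p, b)) := by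
    intro p
    simp
    ring
  rw [Finset.sum_congr rfl (fun p _ => h2 p)]
  rw [← Finset.sum_product']
  apply (Finset.sum_subset ?_ ?_).symm
  · intro k hk
    have hkL : k ∈ L := List.mem_toFinset.1 hk
    rcases k with ⟨p, b⟩
    exact Finset.mem_product.2 ⟨List.mem_toFinset.2 (hcov _ hkL), Finset.mem_univ _⟩
  · intro k _ hk
    have : k ∉ L := fun h => hk (List.mem_toFinset.2 h)
    rw [List.count_eq_zero.2 this, pvC2_zero]



lemma pvG0_keys_eq : pvG0.keys = [(0 : Int)] := by decide

lemma pvIntDiv_C2 (m : Nat) : ((m : Int) * ((m : Int) - 1)) / 2 = pvC2 m := by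
  have h := pvFloordiv_C2 m
  rwa [PySem.Int.floordiv_eq_ediv_of_pos (by norm_num)] at h

-- value of one group term of B, rewritten as C2 of counts in the seeded key list
lemma pvBterm (L0 : List (Int × Bool)) (p : Int) :
    PySem.Int.floordiv
        (((if p = 0 then ((0 : Int), (1 : Int)) else (0, 0)).1 + (L0.count (p, false) : Int)) *
          (((if p = 0 then ((0 : Int), (1 : Int)) else (0, 0)).1 + (L0.count (p, false) : Int)) - 1)) 2
      + PySem.Int.floordiv
        (((if p = 0 then ((0 : Int), (1 : Int)) else (0, 0)).2 + (L0.count (p, true) : Int)) *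
          (((if p = 0 then ((0 : Int), (1 : Int)) else (0, 0)).2 + (L0.count (p, true) : Int)) - 1)) 2
    = pvC2 (([((0 : Int), true)] ++ L0).count (p, false))
      + pvC2 (([((0 : Int), true)] ++ L0).count (p, true)) := by
  have hcf : ([((0 : Int), true)] ++ L0).count (p, false) = L0.count (p, false) := by
    rw [List.count_append]
    have : ((0 : Int), true) ≠ (p, false) := by simp
    simp [List.count_singleton, this]
  by_cases h0 : p = 0
  · subst h0
    have hct : ([((0 : Int), true)] ++ L0).count ((0 : Int), true) = L0.count ((0 : Int), true) + 1 := by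
      rw [List.count_append]
      simp [List.count_singleton]
      omega
    simp only [hcf, hct, if_true]
    norm_num
    rw [pvIntDiv_C2]
    rw [show ((1 : Int) + ((List.count ((0 : Int), true) L0 : Nat) : Int)) * ((List.count ((0 : Int), true) L0 : Nat) : Int)
        = ((List.count ((0 : Int), true) L0 + 1 : Nat) : Int) * (((List.count ((0 : Int), true) L0 + 1 : Nat) : Int) - 1) by
      push_cast; ring]
    rw [pvIntDiv_C2]
  · have hct : ([((0 : Int), true)] ++ L0).count (p, true) = L0.count (p, true) := by
      rw [List.count_append]
      have : ((0 : Int), true) ≠ (p, true) := by simp [Ne.symm h0]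
      simp [List.count_singleton, this]
    simp only [if_neg h0, hcf, hct, zero_add]
    rw [pvFloordiv_C2, pvFloordiv_C2]

-- ===== VERDICT =====

theorem findSubarrCnt_spec : Claim_equal_findSubarrCnt := by
  intro arr n hdom hpre
  unfold Spec_findSubarrCnt
  rw [pvA_eq, pvB_eq]
  have hrw : PySem.List.pyRange 0 n 1 = PySem.List.pyRange 0 ((pvPfx arr n).length : Int) 1 := by
    rw [pvPfx_len]; exact pvRange_norm n
  have henum : PySem.List.enumerate (pvPfx arr n) 0
      = (PySem.List.pyRange 0 ((pvPfx arr n).length : Int) 1).map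
          (fun j => (j, PySem.List.pyGetD (pvPfx arr n) j 0)) := by
    simpa using PySem.List.enumerate_eq_map_pyRange (pvPfx arr n) 0
  have hA : ((PySem.List.pyRange 0 n 1).foldl
      (fun st i => pvBodyA st (i, PySem.List.pyGetD (pvPfx arr n) i 0))
      ((0 : Int), pvOdd0 arr n, pvEven0 arr n))
      = (PySem.List.enumerate (pvPfx arr n) 0).foldl pvBodyA ((0 : Int), pvOdd0 arr n, pvEven0 arr n) := by
    rw [henum, List.foldl_map, hrw]
  rw [hA]
  -- abbreviations
  have hAval : ((PySem.List.enumerate (pvPfx arr n) 0).foldl pvBodyA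
      ((0 : Int), pvOdd0 arr n, pvEven0 arr n)).1
      = pvS ([((0 : Int), true)] ++ (PySem.List.enumerate (pvPfx arr n) 0).map pvKey) := by
    rw [pvLoopA _ 0 _ _ (fun k => (([((0 : Int), true)] : List (Int × Bool)).count k : Int))]
    · rw [pvIncPairs_eq_S]
      have hs0 : pvS [((0 : Int), true)] = 0 := by decide
      rw [hs0]
      ring
    · intro ip _
      rw [pvOdd0_getD]
      by_cases h0 : ip.2 = 0
      · simp [h0, List.count_singleton]
      · have : ((0 : Int), true) ≠ (ip.2, true) := by simp [Ne.symm h0]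
        simp [h0, List.count_singleton, this]
    · intro ip _
      rw [pvEven0_getD]
      have : ((0 : Int), true) ≠ (ip.2, false) := by simp
      simp [List.count_singleton, this]
  rw [hAval]
  -- B side
  have hnd : ((PySem.List.enumerate (pvPfx arr n) 0).foldl pvBodyB pvG0).keys.Nodup :=
    pvLoopB_nodup _
  rw [PySem.Dict.values_eq_map_keys _ hnd ((0 : Int), (0 : Int))]
  rw [pvFoldlAdd, List.map_map, zero_add]
  have hterm : ∀ p ∈ ((PySem.List.enumerate (pvPfx arr n) 0).foldl pvBodyB pvG0).keys,
      ((fun eo : Int × Int =>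
          PySem.Int.floordiv (eo.1 * (eo.1 - 1)) 2 + PySem.Int.floordiv (eo.2 * (eo.2 - 1)) 2) ∘
        fun k => ((PySem.List.enumerate (pvPfx arr n) 0).foldl pvBodyB pvG0).getD k (0, 0)) p
      = pvC2 (([((0 : Int), true)] ++ (PySem.List.enumerate (pvPfx arr n) 0).map pvKey).count (p, false))
        + pvC2 (([((0 : Int), true)] ++ (PySem.List.enumerate (pvPfx arr n) 0).map pvKey).count (p, true)) := by
    intro p _
    simp only [Function.comp_apply]
    rw [pvLoopB_getD, pvG0_getD]
    exact pvBterm _ p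
  rw [List.map_congr_left hterm]
  -- regroup
  apply Eq.symm
  apply pvRegroup _ _ hnd
  intro k hk
  rw [pvLoopB_keys, pvG0_keys_eq, PySem.Set.mem_update]
  rcases List.mem_append.1 hk with h | h
  · left
    have : k = ((0 : Int), true) := by simpa using h
    simp [this]
  · right
    rcases List.mem_map.1 h with ⟨ip, hip, hkey⟩
    have : k.1 = ip.2 := by rw [← hkey]; rfl
    rw [this]
    exact List.mem_map.2 ⟨ip, hip, rfl⟩
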